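-- pv_equiv track=rewrite | github.com/sachabroute/MIASHS | solitaire.py | random_jeu_sol
-- ===== SOURCE A (Python) =====
-- def random_jeu_sol(cartes_alea, nombre_paquets) :
--     ##Crée le plateau de jeu, en fonction des cartes aléatoires
--     ##et du nombre de paquets.
--     nombre_cartes = len(cartes_alea)
--
--     i = 0
--     j = 0
--
--     card = []
--     line = []
--     game = [] ##Variable de sortie
--
--     ##TABLEAU
--     ##On commence par créer les n colonnes du tableau principal.
--     ##La première aura 1 carte, la deuxième 2, etc. On s'arrête
--     ##lorsque la somme est supérieure à la moitié du nombre total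
--     ##de cartes.
--     while j < int(len(cartes_alea)/2) :
--         for k in range(j,j+i) :
--             card.append(cartes_alea[k])
--             card.append(0)
--             line.append(card)
--             card = []
--         card.append(cartes_alea[j+i])
--         card.append(1)
--         line.append(card)
--         game.append(line)
--         i = i+1
--         j = j+i
--         card = []
--         line = []
--
--     ##ARRIVÉE
--     ##On ajoute ensuite les emplacements de l'arrivée, correspondant
--     ##à 4 fois le nombre de paquets.
--     for i in range(nombre_paquets*4) :
--         game.append([])
--
--     ##PIOCHE
--     ##Enfin, on place le reste des cartes dans la pioche, et on
--     ##rajoute une dernière liste correspondant à la pioche retournée.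
--     while j < int(len(cartes_alea)) :
--         card.append(cartes_alea[j])
--         card.append(1)
--         line.append(card)
--         card = []
--         j = j+1
--     game.append(line)
--     game.append([])
--
--     return(game)
-- ===== SOURCE B (Python) =====
-- def random_jeu_sol(cartes_alea, nombre_paquets):
--     ##Même plateau, par récursion: on épluche des colonnes de taille
--     ##croissante au début de la liste restante jusqu'à en avoir consommé
--     ##la moitié du paquet; le reste épluché devient la pioche.
--     half = len(cartes_alea) // 2
--
--     def peel(rest, size, used):
--         if used >= half:
--             return [], rest
--         col, rest2 = rest[:size], rest[size:]
--         cols, leftover = peel(rest2, size + 1, used + size)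
--         return [[[c, 0] for c in col[:-1]] + [[col[-1], 1]]] + cols, leftover
--
--     tableau, leftover = peel(cartes_alea, 1, 0)
--     return tableau + [[] for _ in range(4 * nombre_paquets)] + [[[c, 1] for c in leftover], []]
-- ===== Notes on version B (the rewrite author's own statement) =====
-- stated objective: alternative
-- what changed: Replaces A's index-based iterative construction (counters i/j indexing into cartes_alea) with a recursive peel that consumes the list itself: each call splits off the next column with rest[:size]/rest[size:] and recursion returns both the columns and the leftover cards, which become the pioche; no indices into the original list are used.
import Mathlib
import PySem

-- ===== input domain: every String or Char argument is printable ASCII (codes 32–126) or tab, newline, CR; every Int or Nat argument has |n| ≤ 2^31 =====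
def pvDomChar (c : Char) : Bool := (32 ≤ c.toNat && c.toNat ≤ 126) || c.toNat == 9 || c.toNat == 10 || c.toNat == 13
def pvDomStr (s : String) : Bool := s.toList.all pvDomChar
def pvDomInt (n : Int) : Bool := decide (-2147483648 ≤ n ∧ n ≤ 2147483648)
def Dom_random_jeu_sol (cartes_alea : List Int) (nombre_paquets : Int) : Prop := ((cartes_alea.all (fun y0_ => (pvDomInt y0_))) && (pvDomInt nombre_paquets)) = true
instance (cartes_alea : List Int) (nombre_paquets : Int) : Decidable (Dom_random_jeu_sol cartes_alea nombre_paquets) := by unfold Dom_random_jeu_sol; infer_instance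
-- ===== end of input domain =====

-- B builds the same board by recursively peeling growing columns off the front of the card
-- list (rest[:size]/rest[size:]), the recursion also handing back the leftover cards for the
-- pioche, instead of A's iterative i/j index arithmetic into cartes_alea (B pays suffix copies).
-- A's while loops are ported with a fuel parameter (a totality guard only; fuel always suffices).

-- ===== PORT A =====
-- the tableau while-loop of A: state (i, j, game); card/line are rebuilt each iteration
def pvA_tab (cs : List Int) (half : Int) : Nat → Nat → Int → List (List (List Int)) → List (List (List Int)) × Int
  | 0, _, j, game => (game, j)
  | fuel + 1, i, j, game =>
    if j < half then
      pvA_tab cs half fuel (i + 1) (j + i + 1)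
        (game ++ [((PySem.List.pyRange j (j + i) 1).foldl
                    (fun line k => line ++ [[PySem.List.pyGetD cs k 0, 0]]) [])
                  ++ [[PySem.List.pyGetD cs (j + i) 0, 1]]])
    else (game, j)

-- the pioche while-loop of A
def pvA_pio (cs : List Int) (n : Int) : Nat → Int → List (List Int) → List (List Int)
  | 0, _, line => line
  | fuel + 1, j, line =>
    if j < n then pvA_pio cs n fuel (j + 1) (line ++ [[PySem.List.pyGetD cs j 0, 1]]) else line

def random_jeu_sol (cartes_alea : List Int) (nombre_paquets : Int) : List (List (List Int)) :=
  let half := PySem.Int.floordiv (cartes_alea.length : Int) 2  -- int(len/2), len ≥ 0: exact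
  let r := pvA_tab cartes_alea half half.toNat 0 0 []
  let game := (PySem.List.pyRange 0 (nombre_paquets * 4) 1).foldl
    (fun g _ => g ++ [([] : List (List Int))]) r.1
  (game ++ [pvA_pio cartes_alea (cartes_alea.length : Int) cartes_alea.length r.2 []]) ++ [[]]

-- ===== PORT B =====
-- the recursive peel of Source B; the column size (always ≥ 1) is carried as szp with
-- size = szp + 1 so the used-count strictly grows, which gives termination
def pvB_peel (half : Nat) (rest : List Int) (szp used : Nat) :
    List (List (List Int)) × List Int :=
  if _h : half ≤ used then ([], rest)
  else
    let col := PySem.List.slice rest none (some ((szp + 1 : Nat) : Int))      -- rest[:size]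
    let rest2 := PySem.List.slice rest (some ((szp + 1 : Nat) : Int)) none    -- rest[size:]
    let r := pvB_peel half rest2 (szp + 1) (used + (szp + 1))
    (((PySem.List.slice col none (some (-1))).map (fun c => [c, 0])          -- col[:-1]
        ++ [[PySem.List.pyGetD col (-1) 0, 1]]) :: r.1, r.2)                 -- col[-1]
termination_by half - used
decreasing_by omega

def random_jeu_sol_alt (cartes_alea : List Int) (nombre_paquets : Int) : List (List (List Int)) :=
  let half := cartes_alea.length / 2   -- len(..)//2 on a nonnegative length: Nat division is exact
  let r := pvB_peel half cartes_alea 0 0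
  (r.1 ++ (PySem.List.pyRange 0 (4 * nombre_paquets) 1).map (fun _ => ([] : List (List Int))))
    ++ [r.2.map (fun c => [c, 1]), []]

-- ===== PRECONDITION & SPEC =====
def Spec_random_jeu_sol (cartes_alea : List Int) (nombre_paquets : Int) (out : List (List (List Int))) : Prop := out = random_jeu_sol_alt cartes_alea nombre_paquets
instance (cartes_alea : List Int) (nombre_paquets : Int) (out : List (List (List Int))) : Decidable (Spec_random_jeu_sol cartes_alea nombre_paquets out) := by unfold Spec_random_jeu_sol; infer_instance

-- ===== CLAIM (what is proved, stated in full; the proofs are below) =====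
def Claim_equal_random_jeu_sol : Prop := ∀ (cartes_alea : List Int) (nombre_paquets : Int), Dom_random_jeu_sol cartes_alea nombre_paquets → Spec_random_jeu_sol cartes_alea nombre_paquets (random_jeu_sol cartes_alea nombre_paquets)

-- ===== LEMMAS AND PROOFS =====

-- tri i = 0+1+…+i = the start index of column i in A / the cards consumed before column i in B
def pvTri (c : Nat) : Nat := c * (c + 1) / 2

theorem pvTri_le (c : Nat) : c ≤ pvTri c := by
  unfold pvTri
  match c with
  | 0 => simp
  | Nat.succ m =>
    rw [Nat.le_div_iff_mul_le (by omega : 0 < 2)]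
    exact Nat.mul_le_mul (Nat.le_refl (m + 1)) (by omega)

theorem pvTri_succ (i : Nat) : pvTri (i + 1) = pvTri i + i + 1 := by
  unfold pvTri
  have h : (i + 1) * (i + 1 + 1) = i * (i + 1) + 2 * (i + 1) := by ring
  rw [h, Nat.add_mul_div_left _ _ (by omega : 0 < 2)]
  omega

-- one tableau line of A equals one peeled column of B (indices in range)
theorem pvCol_eq (cs : List Int) (i : Nat) (hin : pvTri i + i < cs.length) :
    ((PySem.List.pyRange ((pvTri i : Nat) : Int) (((pvTri i : Nat) : Int) + i) 1).foldl
        (fun line k => line ++ [[PySem.List.pyGetD cs k 0, 0]]) [])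
      ++ [[PySem.List.pyGetD cs (((pvTri i : Nat) : Int) + i) 0, 1]]
    = (PySem.List.slice ((cs.drop (pvTri i)).take (i + 1)) none (some (-1))).map
        (fun c => [c, 0])
      ++ [[PySem.List.pyGetD ((cs.drop (pvTri i)).take (i + 1)) (-1) 0, 1]] := by
  have hcol : ((cs.drop (pvTri i)).take (i + 1)).length = i + 1 := by
    simp [List.length_take, List.length_drop]; omega
  have hne : (cs.drop (pvTri i)).take (i + 1) ≠ [] := by
    intro h; rw [h] at hcol; simp at hcol
  congr 1
  · -- heads
    rw [PySem.List.foldl_append_singleton_eq_map, PySem.List.pyRange_one,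
      PySem.List.slice_to_neg_one]
    have hd : ((((pvTri i : Nat) : Int) + i) - ((pvTri i : Nat) : Int)).toNat = i := by omega
    rw [hd]
    simp only [List.map_map, List.nil_append]
    apply List.ext_getElem
    · simp [List.length_dropLast]; omega
    · intro k h1 h2
      have hk : k < i := by simpa using h1
      have hk2 : pvTri i + k < cs.length := by omega
      simp only [List.getElem_map, List.getElem_range, Function.comp_apply,
        List.getElem_dropLast, List.getElem_take, List.getElem_drop]
      have : ((pvTri i : Nat) : Int) + (k : Int) = ((pvTri i + k : Nat) : Int) := by
        push_cast; ring
      rw [this, PySem.List.pyGetD_natCast, List.getD_eq_getElem?_getD,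
        List.getElem?_eq_getElem hk2]
      simp
  · -- last card
    rw [PySem.List.pyGetD_neg_one _ _ hne, List.getLast_eq_getElem]
    have : ((pvTri i : Nat) : Int) + (i : Int) = ((pvTri i + i : Nat) : Int) := by
      push_cast; ring
    rw [this, PySem.List.pyGetD_natCast, List.getD_eq_getElem?_getD,
      List.getElem?_eq_getElem hin]
    simp [hcol, List.getElem_take, List.getElem_drop]

-- A's tableau loop produces exactly B's peeled columns, exits at j = tri t,
-- and B's leftover is the suffix from tri t
theorem pvMain (cs : List Int) (half : Int) (halfN : Nat)
    (hrel : (halfN : Int) = half) (hh : 2 * half ≤ (cs.length : Int)) :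
    ∀ (n i : Nat) (game : List (List (List Int))) (fA : Nat),
      halfN - pvTri i ≤ n → (half - ((pvTri i : Nat) : Int)).toNat ≤ fA →
      ∃ t : Nat,
        pvA_tab cs half fA i ((pvTri i : Nat) : Int) game
          = (game ++ (pvB_peel halfN (cs.drop (pvTri i)) i (pvTri i)).1, ((t : Nat) : Int))
        ∧ (pvB_peel halfN (cs.drop (pvTri i)) i (pvTri i)).2 = cs.drop t := by
  intro n
  induction n with
  | zero =>
    intro i game fA hn _
    have hstop : halfN ≤ pvTri i := by omega
    have hstopA : ¬ (((pvTri i : Nat) : Int) < half) := by omega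
    refine ⟨pvTri i, ?_, ?_⟩
    · rw [pvB_peel]
      cases fA <;> simp [pvA_tab, hstopA, hstop]
    · rw [pvB_peel]
      simp [hstop]
  | succ n ih =>
    intro i game fA hn hfA
    by_cases hlt : pvTri i < halfN
    · have hltA : ((pvTri i : Nat) : Int) < half := by omega
      have hin : pvTri i + i < cs.length := by
        have h1 := pvTri_le i; omega
      obtain ⟨fA', rfl⟩ : ∃ f, fA = f + 1 := ⟨fA - 1, by omega⟩
      -- unfold one step on both sides
      have hBstep :
          pvB_peel halfN (cs.drop (pvTri i)) i (pvTri i)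
            = (((PySem.List.slice ((cs.drop (pvTri i)).take (i + 1)) none (some (-1))).map
                  (fun c => [c, 0])
                ++ [[PySem.List.pyGetD ((cs.drop (pvTri i)).take (i + 1)) (-1) 0, 1]])
                :: (pvB_peel halfN (cs.drop (pvTri (i + 1))) (i + 1) (pvTri (i + 1))).1,
               (pvB_peel halfN (cs.drop (pvTri (i + 1))) (i + 1) (pvTri (i + 1))).2) := by
        rw [pvB_peel]
        simp only [dif_neg (by omega : ¬ halfN ≤ pvTri i)]
        rw [PySem.List.slice_to_natCast, PySem.List.slice_from_natCast, List.drop_drop]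
        have e2 : pvTri i + (i + 1) = pvTri (i + 1) := by rw [pvTri_succ]; omega
        rw [e2]
      have hj : ((pvTri i : Nat) : Int) + (i : Int) + 1 = ((pvTri (i + 1) : Nat) : Int) := by
        rw [pvTri_succ]; push_cast; ring
      have hfA' : (half - ((pvTri (i + 1) : Nat) : Int)).toNat ≤ fA' := by
        rw [pvTri_succ]; push_cast; omega
      obtain ⟨t, hA, hB⟩ := ih (i + 1)
        (game ++ [((PySem.List.pyRange ((pvTri i : Nat) : Int)
                    (((pvTri i : Nat) : Int) + i) 1).foldl
                    (fun line k => line ++ [[PySem.List.pyGetD cs k 0, 0]]) [])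
                  ++ [[PySem.List.pyGetD cs (((pvTri i : Nat) : Int) + i) 0, 1]]])
        fA' (by rw [pvTri_succ]; omega) hfA'
      refine ⟨t, ?_, ?_⟩
      · simp only [pvA_tab, hltA, if_pos]
        rw [hj, hA, hBstep, pvCol_eq cs i hin]
        simp [List.append_assoc]
      · rw [hBstep]; exact hB
    · have hstopA : ¬ (((pvTri i : Nat) : Int) < half) := by omega
      have hstop : halfN ≤ pvTri i := by omega
      refine ⟨pvTri i, ?_, ?_⟩
      · rw [pvB_peel]
        cases fA <;> simp [pvA_tab, hstopA, hstop]
      · rw [pvB_peel]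
        simp [hstop]

-- the pioche loop of A equals mapping over the suffix from j
theorem pvPio_eq (cs : List Int) :
    ∀ (m j : Nat) (line : List (List Int)) (fP : Nat),
      m = cs.length - j → cs.length - j ≤ fP →
      pvA_pio cs (cs.length : Int) fP ((j : Nat) : Int) line
        = line ++ (cs.drop j).map (fun x => [x, 1]) := by
  intro m
  induction m with
  | zero =>
    intro j line fP hm _
    have hge : ¬ (((j : Nat) : Int) < (cs.length : Int)) := by omega
    rw [List.drop_eq_nil_of_le (by omega)]
    cases fP <;> simp [pvA_pio, hge]
  | succ m ih =>
    intro j line fP hm hfP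
    have hlt : ((j : Nat) : Int) < (cs.length : Int) := by omega
    have hj : j < cs.length := by omega
    obtain ⟨fP', rfl⟩ : ∃ f, fP = f + 1 := ⟨fP - 1, by omega⟩
    simp only [pvA_pio, hlt, if_pos]
    have h1 : ((j : Nat) : Int) + 1 = ((j + 1 : Nat) : Int) := by push_cast; ring
    rw [h1, ih (j + 1) _ fP' (by omega) (by omega), List.drop_eq_getElem_cons hj]
    simp only [List.getD_eq_getElem?_getD, List.getElem?_eq_getElem hj, Option.getD_some,
      PySem.List.pyGetD_natCast, List.map_cons, List.append_assoc, List.cons_append,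
      List.nil_append]

-- ===== VERDICT (by name: the statement is the Claim_ definition above) =====
theorem random_jeu_sol_spec : Claim_equal_random_jeu_sol := by
  unfold Claim_equal_random_jeu_sol
  intro cs p _dom
  unfold Spec_random_jeu_sol random_jeu_sol random_jeu_sol_alt
  have hrel : ((cs.length / 2 : Nat) : Int) = PySem.Int.floordiv (cs.length : Int) 2 := by
    rw [PySem.Int.floordiv_eq_ediv_of_pos (by omega)]
    omega
  have hh : 2 * PySem.Int.floordiv (cs.length : Int) 2 ≤ (cs.length : Int) := by omega
  have h0 : pvTri 0 = 0 := by simp [pvTri]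
  obtain ⟨t, hA, hB⟩ := pvMain cs (PySem.Int.floordiv (cs.length : Int) 2) (cs.length / 2)
    hrel hh (cs.length / 2 - pvTri 0) 0 [] (PySem.Int.floordiv (cs.length : Int) 2).toNat
    (by omega) (by rw [h0]; push_cast; omega)
  rw [h0] at hA hB
  simp only [List.drop_zero] at hA hB
  have hcast0 : ((0 : Nat) : Int) = 0 := rfl
  rw [hcast0] at hA
  simp only [hA, List.nil_append]
  rw [PySem.List.foldl_append_singleton_eq_map, mul_comm p 4,
    pvPio_eq cs (cs.length - t) t [] cs.length rfl (by omega), hB]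
  simp [List.append_assoc]
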